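-- pv_equiv track=rewrite | github.com/jgonz671/Dockership | tasks/ship_balancer.py | calculate_all_sift_slots
-- ===== SOURCE A (Python) =====
-- def calculate_all_sift_slots(ship_grid):
--     halfway_line = len(ship_grid[0]) / 2
--
--     all_slots = []
--
--     for r in range(len(ship_grid)):
--         p = -1
--         curr_slot = [r, halfway_line - 1]
--         for c in range(len(ship_grid[0])):
--             slot = [r, int((curr_slot[1] + (c * pow(-1, p)))) % 12]
--             p += 1
--             all_slots.append(slot)
--             curr_slot = slot
--
--     return all_slots
-- ===== SOURCE B (Python) =====
-- # Closed-form per-slot computation: replaces A's running accumulator / sign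
-- # toggle with a direct formula for each column. Return value only; raises on
-- # an empty grid exactly like A (ship_grid[0]).
-- def calculate_all_sift_slots(ship_grid):
--     rows = len(ship_grid)
--     cols = len(ship_grid[0])
--     # base = int(cols/2 - 1) written in integer arithmetic
--     base = 0 if cols < 2 else (cols - 2) // 2
--
--     def S(c):
--         return (c + 1) // 2 if c % 2 == 1 else -(c // 2)
--
--     return [[r, (base + S(c)) % 12] for r in range(rows) for c in range(cols)]
-- ===== Notes on version B (the rewrite author's own statement) =====
-- stated objective: simpler
-- what changed: Each slot column is computed directly by a closed-form alternating partial sum (base + S(c)) % 12 instead of A's running float accumulator with a pow(-1,p) sign toggle; Pre_ excludes only the empty grid, on which A raises IndexError.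
import Mathlib
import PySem

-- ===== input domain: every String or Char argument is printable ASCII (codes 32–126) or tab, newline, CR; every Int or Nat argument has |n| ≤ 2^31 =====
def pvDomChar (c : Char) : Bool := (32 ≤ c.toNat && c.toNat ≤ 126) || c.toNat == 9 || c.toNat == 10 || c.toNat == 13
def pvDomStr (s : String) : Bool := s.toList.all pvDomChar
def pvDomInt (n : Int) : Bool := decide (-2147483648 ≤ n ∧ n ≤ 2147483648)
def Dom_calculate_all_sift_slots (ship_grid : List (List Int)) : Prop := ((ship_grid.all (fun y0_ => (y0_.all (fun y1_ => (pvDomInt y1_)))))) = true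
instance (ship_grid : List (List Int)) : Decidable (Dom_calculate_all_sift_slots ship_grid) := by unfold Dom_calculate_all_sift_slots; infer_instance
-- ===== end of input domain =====

-- B computes each slot column by a closed-form alternating partial sum instead of
-- A's running float accumulator with a pow(-1,p) sign toggle (objective: simpler).

-- ===== PORT A =====
-- A's floats (len/2, pow(-1,-1)) are half-integers; ℚ represents them exactly,
-- and pyTruncQ is Python's int(): truncation toward zero (exact on ℚ).
def pyTruncQ (q : ℚ) : Int := if 0 ≤ q then ⌊q⌋ else ⌈q⌉

-- the body of A's inner loop: state = (p, curr_slot[1], all_slots)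
def stepA (r : Int) (st : Int × ℚ × List (List Int)) (c : Int) : Int × ℚ × List (List Int) :=
  let col : Int := PySem.Int.mod (pyTruncQ (st.2.1 + (c : ℚ) * (-1 : ℚ) ^ st.1)) 12
  (st.1 + 1, (col : ℚ), st.2.2 ++ [[r, col]])

-- one iteration of A's outer loop (p = -1; curr_slot = [r, halfway_line - 1])
def rowA (cols : Nat) (all_slots : List (List Int)) (r : Int) : List (List Int) :=
  ((PySem.List.pyRange 0 (cols : Int) 1).foldl (stepA r)
    (-1, (cols : ℚ) / 2 - 1, all_slots)).2.2

def calculate_all_sift_slots (ship_grid : List (List Int)) : List (List Int) :=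
  -- ship_grid[0]: IndexError on the empty grid, excluded by Pre_
  let row0 : List Int := (PySem.List.pyGet? ship_grid 0).getD []
  (PySem.List.pyRange 0 (ship_grid.length : Int) 1).foldl (rowA row0.length) []

-- ===== PORT B =====
def sift_S (c : Int) : Int :=
  if PySem.Int.mod c 2 = 1 then PySem.Int.floordiv (c + 1) 2 else -(PySem.Int.floordiv c 2)

def calculate_all_sift_slots_alt (ship_grid : List (List Int)) : List (List Int) :=
  let rows : Int := ship_grid.length
  let cols : Int := ((PySem.List.pyGet? ship_grid 0).getD []).length
  let base : Int := if cols < 2 then 0 else PySem.Int.floordiv (cols - 2) 2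
  (PySem.List.pyRange 0 rows 1).flatMap (fun r =>
    (PySem.List.pyRange 0 cols 1).map (fun c => [r, PySem.Int.mod (base + sift_S c) 12]))

-- ===== PRECONDITION & SPEC =====
-- Pre_ excludes only the empty grid, on which A (ship_grid[0]) raises IndexError.
def Pre_calculate_all_sift_slots (ship_grid : List (List Int)) : Prop := ship_grid ≠ []
instance (ship_grid : List (List Int)) : Decidable (Pre_calculate_all_sift_slots ship_grid) := by unfold Pre_calculate_all_sift_slots; infer_instance
def pvWitness_calculate_all_sift_slots : List (List Int) := [[0]]

def Spec_calculate_all_sift_slots (ship_grid : List (List Int)) (out : List (List Int)) : Prop := out = calculate_all_sift_slots_alt ship_grid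
instance (ship_grid : List (List Int)) (out : List (List Int)) : Decidable (Spec_calculate_all_sift_slots ship_grid out) := by unfold Spec_calculate_all_sift_slots; infer_instance

-- ===== CLAIM (what is proved, stated in full; the proofs are below) =====
def Claim_equal_calculate_all_sift_slots : Prop := ∀ (ship_grid : List (List Int)), Dom_calculate_all_sift_slots ship_grid → Pre_calculate_all_sift_slots ship_grid → Spec_calculate_all_sift_slots ship_grid (calculate_all_sift_slots ship_grid)

-- ===== LEMMAS AND PROOFS =====

def baseB (cols : Nat) : Int :=
  if (cols : Int) < 2 then 0 else PySem.Int.floordiv ((cols : Int) - 2) 2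

def colB (cols : Nat) (c : Int) : Int := PySem.Int.mod (baseB cols + sift_S c) 12

-- curr_slot[1] after n iterations of A's inner loop
def currQ (cols n : Nat) : ℚ :=
  if n = 0 then (cols : ℚ) / 2 - 1 else ((colB cols ((n : Int) - 1)) : ℚ)

lemma pyTruncQ_intCast (z : Int) : pyTruncQ (z : ℚ) = z := by
  unfold pyTruncQ; split <;> simp

lemma trunc_base (cols : Nat) (h : 1 ≤ cols) :
    pyTruncQ ((cols : ℚ) / 2 - 1) = baseB cols := by
  unfold baseB
  rcases Nat.even_or_odd cols with ⟨k, hk⟩ | ⟨k, hk⟩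
  · subst hk
    have : ((k + k : Nat) : ℚ) / 2 - 1 = ((k - 1 : Int) : ℚ) := by push_cast; ring
    rw [this, pyTruncQ_intCast]
    rw [PySem.Int.floordiv_eq_ediv_of_pos (by omega)]
    split <;> omega
  · subst hk
    rcases Nat.eq_or_lt_of_le h with h1 | h1
    · have : ((2 * k + 1 : Nat) : ℚ) / 2 - 1 = -(1/2 : ℚ) := by
        have hk0 : k = 0 := by omega
        subst hk0; norm_num
      rw [this]
      have : ¬ (0 : ℚ) ≤ -(1/2) := by norm_num
      unfold pyTruncQ
      rw [if_neg this]
      have hc : ((2 * k + 1 : Nat) : Int) < 2 := by omega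
      rw [if_pos hc]
      norm_num
    · have hk1 : 1 ≤ k := by omega
      have hval : ((2 * k + 1 : Nat) : ℚ) / 2 - 1 = ((k - 1 : Int) : ℚ) + 1/2 := by push_cast; ring
      have hnn : (0 : ℚ) ≤ ((k - 1 : Int) : ℚ) + 1/2 := by
        have : (1 : ℚ) ≤ ((k : Int) : ℚ) := by exact_mod_cast hk1
        push_cast at this ⊢; linarith
      unfold pyTruncQ
      rw [hval, if_pos hnn]
      have hfl : ⌊((k - 1 : Int) : ℚ) + 1/2⌋ = (k : Int) - 1 := by
        rw [Int.floor_eq_iff]; push_cast; constructor <;> linarith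
      rw [hfl]
      have hc : ¬ ((2 * k + 1 : Nat) : Int) < 2 := by omega
      rw [if_neg hc, PySem.Int.floordiv_eq_ediv_of_pos (by omega)]
      omega

lemma sift_S_succ (m : Nat) :
    sift_S ((m : Int) + 1) = sift_S (m : Int) + ((m : Int) + 1) * (-1 : Int) ^ m := by
  unfold sift_S
  rcases Nat.even_or_odd m with hm | hm
  · rw [Even.neg_one_pow hm]
    obtain ⟨k, hk⟩ := hm
    subst hk
    have h1 : ((k + k : Nat) : Int) = 2 * k := by push_cast; ring
    simp only [PySem.Int.mod_eq_emod_of_pos (show (0:Int) < 2 by omega),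
      PySem.Int.floordiv_eq_ediv_of_pos (show (0:Int) < 2 by omega), h1]
    split_ifs <;> omega
  · rw [Odd.neg_one_pow hm]
    obtain ⟨k, hk⟩ := hm
    subst hk
    have h1 : ((2 * k + 1 : Nat) : Int) = 2 * k + 1 := by push_cast; ring
    simp only [PySem.Int.mod_eq_emod_of_pos (show (0:Int) < 2 by omega),
      PySem.Int.floordiv_eq_ediv_of_pos (show (0:Int) < 2 by omega), h1]
    split_ifs <;> omega

lemma mod12_add (a t : Int) :
    PySem.Int.mod (PySem.Int.mod a 12 + t) 12 = PySem.Int.mod (a + t) 12 := by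
  rw [PySem.Int.mod_eq_emod_of_pos (by omega), PySem.Int.mod_eq_emod_of_pos (by omega),
    PySem.Int.mod_eq_emod_of_pos (by omega)]
  omega

-- the column A writes at inner index n equals B's closed form
lemma core_col (cols n : Nat) (h : n < cols) :
    PySem.Int.mod (pyTruncQ (currQ cols n + (n : ℚ) * (-1 : ℚ) ^ ((n : Int) - 1))) 12
      = colB cols (n : Int) := by
  cases n with
  | zero =>
    have hS : sift_S 0 = 0 := by decide
    unfold currQ colB
    simp only [Nat.cast_zero, reduceIte, hS, add_zero]
    have hz : (0 : ℚ) * (-1 : ℚ) ^ ((0 : Int) - 1) = 0 := by norm_num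
    rw [hz, add_zero, trunc_base cols (by omega)]
  | succ m =>
    unfold currQ
    rw [if_neg (by omega)]
    have hmc : ((m + 1 : Nat) : Int) - 1 = (m : Int) := by push_cast; ring
    have hn1 : ((m + 1 : Nat) : Int) = (m : Int) + 1 := by push_cast; ring
    rw [hmc, hn1, zpow_natCast]
    have hcast : ((colB cols (m : Int)) : ℚ) + ((m + 1 : Nat) : ℚ) * (-1 : ℚ) ^ m
        = ((colB cols (m : Int) + ((m : Int) + 1) * (-1 : Int) ^ m : Int) : ℚ) := by
      push_cast; ring
    rw [hcast, pyTruncQ_intCast]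
    unfold colB
    rw [mod12_add, add_assoc, ← sift_S_succ]

-- invariant of A's inner loop after n iterations
lemma foldA_inv (r : Int) (cols : Nat) (acc : List (List Int)) (n : Nat) (hn : n ≤ cols) :
    (PySem.List.pyRange 0 (n : Int) 1).foldl (stepA r) (-1, (cols : ℚ) / 2 - 1, acc)
      = ((n : Int) - 1, currQ cols n,
          acc ++ (PySem.List.pyRange 0 (n : Int) 1).map (fun c => [r, colB cols c])) := by
  induction n with
  | zero =>
    simp [PySem.List.pyRange_one_eq_nil, currQ]
  | succ m ih =>
    have hm : m ≤ cols := by omega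
    have hsplit : PySem.List.pyRange 0 ((m + 1 : Nat) : Int) 1
        = PySem.List.pyRange 0 (m : Int) 1 ++ [(m : Int)] := by
      have : ((m + 1 : Nat) : Int) = (m : Int) + 1 := by push_cast; ring
      rw [this, PySem.List.pyRange_one_succ_right (by omega)]
    rw [hsplit, List.foldl_append, ih hm, List.foldl_cons, List.foldl_nil]
    unfold stepA
    simp only [List.map_append, List.map_cons, List.map_nil, ← List.append_assoc,
      Int.cast_natCast]
    have hcol := core_col cols m (by omega)
    have hmc : ((m + 1 : Nat) : Int) - 1 = (m : Int) := by push_cast; ring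
    rw [hcol]
    simp only [Prod.mk.injEq]
    refine ⟨by push_cast; ring, ?_, trivial⟩
    unfold currQ
    rw [if_neg (by omega), hmc]

lemma rowA_eq (cols : Nat) (acc : List (List Int)) (r : Int) :
    rowA cols acc r
      = acc ++ (PySem.List.pyRange 0 (cols : Int) 1).map (fun c => [r, colB cols c]) := by
  unfold rowA
  rw [foldA_inv r cols acc cols le_rfl]

lemma foldl_rowA (cols : Nat) (rs : List Int) (acc : List (List Int)) :
    rs.foldl (rowA cols) acc
      = acc ++ rs.flatMap (fun r =>
          (PySem.List.pyRange 0 (cols : Int) 1).map (fun c => [r, colB cols c])) := by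
  induction rs generalizing acc with
  | nil => simp
  | cons r rs ih =>
    simp only [List.foldl_cons, List.flatMap_cons]
    rw [rowA_eq, ih, List.append_assoc]

-- ===== VERDICT (by name: the statement is the Claim_ definition above) =====
theorem calculate_all_sift_slots_spec : Claim_equal_calculate_all_sift_slots := by
  intro ship_grid _ hpre
  unfold Spec_calculate_all_sift_slots
  cases ship_grid with
  | nil => exact absurd rfl hpre
  | cons h t =>
    unfold calculate_all_sift_slots calculate_all_sift_slots_alt
    simp only [PySem.List.pyGet?_zero_cons, Option.getD_some]
    rw [foldl_rowA]
    simp only [List.nil_append, colB, baseB]
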